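-- pv_equiv track=rewrite | github.com/Clearyoi/adventofcode | 2025/3/part2.py | getJoltage
-- ===== SOURCE A (Python) =====
-- def getJoltage(nums, scale):
-- 	if scale == 1:
-- 		return max(nums)
-- 	high, start = 0, 0
-- 	for i, n in enumerate(nums[:-(scale-1)]):
-- 		if n > high:
-- 			high = n
-- 			start = i
-- 	return high*pow(10,scale-1)+getJoltage(nums[start+1:], scale-1)
-- ===== SOURCE B (Python) =====
-- def getJoltage(nums, scale):
--     n = len(nums)
--     pos = 0
--     acc = 0
--     for k in range(scale, 1, -1):
--         best = 0
--         bi = pos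
--         for j in range(pos, n - k + 1):
--             if nums[j] > best:
--                 best = nums[j]
--                 bi = j
--         acc = acc * 10 + best
--         pos = bi + 1
--     m = nums[pos]
--     for j in range(pos + 1, n):
--         if nums[j] > m:
--             m = nums[j]
--     return acc * 10 + m
-- ===== Notes on version B (the rewrite author's own statement) =====
-- stated objective: faster
-- what changed: A's recursion that copies a fresh slice of the list at every digit is replaced by a single iterative Horner loop over an index pointer into the unmodified list (no recursion, no list copies).
import Mathlib
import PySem

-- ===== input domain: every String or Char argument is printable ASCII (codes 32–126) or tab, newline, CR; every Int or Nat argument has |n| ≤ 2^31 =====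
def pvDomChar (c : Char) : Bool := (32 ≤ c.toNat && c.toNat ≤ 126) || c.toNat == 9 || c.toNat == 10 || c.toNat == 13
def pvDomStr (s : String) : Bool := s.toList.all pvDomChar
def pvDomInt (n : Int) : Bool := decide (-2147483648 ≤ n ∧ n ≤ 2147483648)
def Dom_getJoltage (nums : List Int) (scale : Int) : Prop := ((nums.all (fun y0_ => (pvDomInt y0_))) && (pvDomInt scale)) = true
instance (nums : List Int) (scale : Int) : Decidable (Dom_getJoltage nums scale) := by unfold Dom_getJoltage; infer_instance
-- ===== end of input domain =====

-- B replaces A's recursion with per-step list slicing by a single iterative Horner loop over an index pointer (no list copies, no recursion); return values proved equal on Pre_.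

-- ===== PORT A =====
-- A-side helper: the body "if n > high: high, start = n, i" of A's enumerate loop
def gjStepA (p : Int × Int) (q : Int × Int) : Int × Int :=
  if q.2 > p.1 then (q.2, q.1) else p

-- A-side helper: the whole "high, start = 0, 0; for i, n in enumerate(...)" scan, returning (high, start)
def gjScanA (l : List Int) : Int × Int :=
  (PySem.List.enumerate l 0).foldl gjStepA (0, 0)

-- fuel recursion (fuel = scale.toNat suffices on Pre_; Python diverges for scale ≤ 0, which Pre_ excludes)
def getJoltageGo : Nat → List Int → Int → Int
  | 0, _, _ => 0
  | f + 1, nums, scale =>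
    if scale = 1 then (PySem.List.max? nums (fun y => y)).getD 0   -- max(nums); Pre_ gives nums ≠ [] here
    else
      -- pow(10, scale-1) is exact for scale ≥ 1, which Pre_ guarantees here
      (gjScanA (PySem.List.slice nums none (some (-(scale - 1))))).1 * 10 ^ (scale - 1).toNat
        + getJoltageGo f
            (PySem.List.slice nums (some ((gjScanA (PySem.List.slice nums none (some (-(scale - 1))))).2 + 1)) none)
            (scale - 1)

def getJoltage (nums : List Int) (scale : Int) : Int := getJoltageGo scale.toNat nums scale

-- ===== PORT B =====
-- B-side helpers: the two inner loop bodies and the per-digit outer loop body of Source B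
def gjStepB (nums : List Int) (p : Int × Int) (j : Int) : Int × Int :=
  if PySem.List.pyGetD nums j 0 > p.1 then (PySem.List.pyGetD nums j 0, j) else p

def gjOuterB (nums : List Int) (st : Int × Int) (k : Int) : Int × Int :=
  let bb := (PySem.List.pyRange st.1 ((nums.length : Int) - k + 1)).foldl (gjStepB nums) (0, st.1)
  (bb.2 + 1, st.2 * 10 + bb.1)

def gjFinB (nums : List Int) (pos : Int) : Int :=
  (PySem.List.pyRange (pos + 1) (nums.length : Int)).foldl
    (fun m j => if PySem.List.pyGetD nums j 0 > m then PySem.List.pyGetD nums j 0 else m)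
    (PySem.List.pyGetD nums pos 0)

def getJoltage_alt (nums : List Int) (scale : Int) : Int :=
  let st := (PySem.List.pyRange scale 1 (-1)).foldl (gjOuterB nums) (0, 0)
  st.2 * 10 + gjFinB nums st.1

-- ===== PRECONDITION & SPEC =====
-- Pre_: exactly the inputs on which Python A returns: A raises ValueError (max() of an empty
-- suffix) when scale > len(nums) and RecursionError (unbounded recursion) when scale < 1.
def Pre_getJoltage (nums : List Int) (scale : Int) : Prop :=
  1 ≤ scale ∧ scale ≤ (nums.length : Int)
instance (nums : List Int) (scale : Int) : Decidable (Pre_getJoltage nums scale) := by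
  unfold Pre_getJoltage; infer_instance

def pvWitness_getJoltage : List Int × Int := ([3, 1, 4, 1, 5], 3)

def Spec_getJoltage (nums : List Int) (scale : Int) (out : Int) : Prop := out = getJoltage_alt nums scale
instance (nums : List Int) (scale : Int) (out : Int) : Decidable (Spec_getJoltage nums scale out) := by
  unfold Spec_getJoltage; infer_instance

-- ===== CLAIM (what is proved, stated in full; the proofs are below) =====
def Claim_equal_getJoltage : Prop := ∀ (nums : List Int) (scale : Int), Dom_getJoltage nums scale → Pre_getJoltage nums scale → Spec_getJoltage nums scale (getJoltage nums scale)

-- ===== LEMMAS AND PROOFS =====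

-- B's run from an arbitrary remaining-digit count / pointer / accumulator, for the induction
def gjRunB (nums : List Int) (scale pos acc : Int) : Int :=
  let st := (PySem.List.pyRange scale 1 (-1)).foldl (gjOuterB nums) (pos, acc)
  st.2 * 10 + gjFinB nums st.1

lemma gjAlt_eq_run (nums : List Int) (scale : Int) :
    getJoltage_alt nums scale = gjRunB nums scale 0 0 := rfl

lemma gjScanA_eq (l : List Int) :
    gjScanA l = (PySem.List.enumerate l 0).foldl gjStepA (0, 0) := rfl

-- the chosen index of A's scan stays at its initial value or is one of the scanned indices
lemma gjStepA_snd_bound (w : List Int) : ∀ (i0 b t : Int),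
    ((PySem.List.enumerate w i0).foldl gjStepA (b, t)).2 = t ∨
      (i0 ≤ ((PySem.List.enumerate w i0).foldl gjStepA (b, t)).2 ∧
        ((PySem.List.enumerate w i0).foldl gjStepA (b, t)).2 < i0 + (w.length : Int)) := by
  induction w with
  | nil => intro i0 b t; simp [PySem.List.enumerate]
  | cons x xs ih =>
    intro i0 b t
    rw [PySem.List.enumerate_cons, List.foldl_cons,
      show gjStepA (b, t) (i0, x) = if x > b then (x, i0) else (b, t) from rfl]
    have hlc : (((x :: xs).length : Nat) : Int) = (xs.length : Int) + 1 := by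
      push_cast [List.length_cons]; ring
    rw [hlc]
    split_ifs with h
    · rcases ih (i0 + 1) x i0 with h1 | h1
      · right; rw [h1]; constructor <;> omega
      · right; omega
    · rcases ih (i0 + 1) b t with h1 | h1
      · left; exact h1
      · right; omega

-- B's absolute-index window scan equals A's enumerate scan of the same window, shifted by a
lemma gjScan_pair (nums : List Int) (a : Int) : ∀ (w : List Int) (i0 b t : Int),
    (∀ (k : Nat), k < w.length → PySem.List.pyGetD nums (a + i0 + (k : Int)) 0 = w.getD k 0) →
    (PySem.List.pyRange (a + i0) (a + i0 + (w.length : Int))).foldl (gjStepB nums) (b, a + t)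
      = (((PySem.List.enumerate w i0).foldl gjStepA (b, t)).1,
          a + ((PySem.List.enumerate w i0).foldl gjStepA (b, t)).2) := by
  intro w
  induction w with
  | nil => intro i0 b t _; simp [PySem.List.enumerate, PySem.List.pyRange_one_eq_nil]
  | cons x xs ih =>
    intro i0 b t h
    have hx : PySem.List.pyGetD nums (a + i0) 0 = x := by
      have := h 0 (by simp)
      simpa using this
    have hlen : a + i0 + (((x :: xs).length : Nat) : Int) = (a + (i0 + 1)) + (xs.length : Int) := by
      push_cast [List.length_cons]; ring
    rw [hlen, PySem.List.pyRange_one_cons (by omega), List.foldl_cons,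
      PySem.List.enumerate_cons, List.foldl_cons,
      show gjStepB nums (b, a + t) (a + i0)
          = if PySem.List.pyGetD nums (a + i0) 0 > b then (PySem.List.pyGetD nums (a + i0) 0, a + i0) else (b, a + t) from rfl,
      show gjStepA (b, t) (i0, x) = if x > b then (x, i0) else (b, t) from rfl, hx]
    have hshift : ∀ (k : Nat), k < xs.length →
        PySem.List.pyGetD nums (a + (i0 + 1) + (k : Int)) 0 = xs.getD k 0 := by
      intro k hk
      have := h (k + 1) (by simpa using Nat.succ_lt_succ hk)
      simpa [show a + i0 + ((k : Int) + 1) = a + (i0 + 1) + (k : Int) by ring] using this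
    split_ifs with hc
    · have := ih (i0 + 1) x i0 hshift
      simpa [show a + i0 + 1 = a + (i0 + 1) by ring] using this
    · have := ih (i0 + 1) b t hshift
      simpa [show a + i0 + 1 = a + (i0 + 1) by ring] using this

-- Python's running-max loop computes the max
lemma gjFold_max (t : List Int) : ∀ (x : Int),
    t.foldl (fun m v => if v > m then v else m) x = t.foldl max x := by
  induction t with
  | nil => intro x; rfl
  | cons y ys ih =>
    intro x
    rw [List.foldl_cons, List.foldl_cons, ih]
    congr 1
    rcases le_total x y with h | h
    · rw [max_eq_right h]; split_ifs with h2 <;> omega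
    · rw [max_eq_left h]; split_ifs with h2 <;> omega

-- main induction: B's run from pointer pos with s digits left ≡ A on the suffix nums[pos:]
lemma gjMain (s : Nat) : ∀ (f : Nat) (nums : List Int) (pos acc : Int),
    1 ≤ s → s ≤ f → 0 ≤ pos → pos.toNat + s ≤ nums.length →
    gjRunB nums (s : Int) pos acc
      = acc * 10 ^ s + getJoltageGo f (nums.drop pos.toNat) (s : Int) := by
  induction s with
  | zero => intro _ _ _ _ h; omega
  | succ n ih =>
    intro f nums pos acc _ hf hpos hlen
    obtain ⟨f', rfl⟩ : ∃ f', f = f' + 1 := ⟨f - 1, by omega⟩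
    set nd := nums.drop pos.toNat with hnd
    have hndlen : nd.length = nums.length - pos.toNat := by simp [hnd]
    by_cases hn : n = 0
    · -- base: one digit left; B's final loop = max(nums[pos:])
      subst hn
      have hne : pos.toNat < nums.length := by omega
      obtain ⟨x, t, hxt⟩ : ∃ x t, nd = x :: t := by
        rcases hd : nd with _ | ⟨x, t⟩
        · exfalso; rw [hd] at hndlen; simp at hndlen; omega
        · exact ⟨x, t, rfl⟩
      rw [show (((0 + 1 : Nat)) : Int) = (1 : Int) by norm_num]
      simp only [gjRunB]
      rw [PySem.List.pyRange_neg_one_eq_nil (by omega), List.foldl_nil]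
      show acc * 10 + gjFinB nums pos = acc * 10 ^ (0 + 1) + getJoltageGo (f' + 1) nd 1
      have hget : nums[pos.toNat]? = some x := by
        have h0 := List.getElem?_drop (xs := nums) (i := pos.toNat) (j := 0)
        rw [← hnd, hxt] at h0
        simpa using h0.symm
      have hinit : PySem.List.pyGetD nums pos 0 = x := by
        rw [show pos = ((pos.toNat : Nat) : Int) by omega, PySem.List.pyGetD_natCast,
          List.getD_eq_getElem?_getD, hget]
        rfl
      have hdropt : nums.drop (pos.toNat + 1) = t := by
        have h1 := List.drop_drop (i := 1) (j := pos.toNat) (l := nums)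
        rw [← hnd, hxt] at h1
        simpa using h1.symm
      conv_rhs => rw [getJoltageGo]
      rw [if_pos rfl, hxt, PySem.List.max?_id_cons, Option.getD_some]
      unfold gjFinB
      rw [hinit,
        PySem.List.foldl_pyRange_pyGetD' nums 0 (fun m v => if v > m then v else m) x (by omega),
        show (pos + 1).toNat = pos.toNat + 1 by omega, hdropt, gjFold_max]
      ring
    · -- step: peel the top digit
      have hn1 : 1 ≤ n := by omega
      set w := nd.take (nd.length - n) with hw
      have hwlen : w.length = nums.length - pos.toNat - n := by
        simp [hw, hndlen]
      have hwpos : 1 ≤ w.length := by omega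
      -- the indexed-window hypothesis for the scan-pairing lemma
      have hidx : ∀ (k : Nat), k < w.length →
          PySem.List.pyGetD nums (pos + 0 + (k : Int)) 0 = w.getD k 0 := by
        intro k hk
        have hk2 : pos.toNat + k < nums.length := by omega
        rw [show pos + 0 + (k : Int) = (((pos.toNat + k : Nat)) : Int) by omega,
          PySem.List.pyGetD_natCast, List.getD_eq_getElem?_getD, List.getD_eq_getElem?_getD,
          hw, hnd, List.getElem?_take_of_lt (by rw [hw, hnd] at hk; simpa using hk),
          List.getElem?_drop]
      have hscan : (PySem.List.pyRange pos ((nums.length : Int) - ((n : Int) + 1) + 1)).foldl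
            (gjStepB nums) (0, pos) = ((gjScanA w).1, pos + (gjScanA w).2) := by
        have h := gjScan_pair nums pos w 0 0 0 hidx
        rw [← gjScanA_eq] at h
        rw [show (nums.length : Int) - ((n : Int) + 1) + 1 = pos + 0 + (w.length : Int) by
          rw [hwlen]; omega]
        simpa using h
      have hrb := gjStepA_snd_bound w 0 0 0
      rw [← gjScanA_eq] at hrb
      have hr2 : 0 ≤ (gjScanA w).2 ∧ (gjScanA w).2 ≤ (w.length : Int) - 1 := by
        rcases hrb with h1 | h1
        · rw [h1]; constructor <;> [omega; (push_cast; omega)]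
        · omega
      have houter : gjOuterB nums (pos, acc) ((n : Int) + 1)
          = (pos + (gjScanA w).2 + 1, acc * 10 + (gjScanA w).1) := by
        simp only [gjOuterB]
        rw [hscan]
      -- B side: peel the first outer iteration
      simp only [gjRunB]
      rw [show (((n + 1 : Nat)) : Int) = (n : Int) + 1 by push_cast; ring,
        PySem.List.pyRange_neg_one_cons (by omega), List.foldl_cons,
        show (n : Int) + 1 - 1 = (n : Int) by ring, houter]
      -- IH on the remaining n digits
      have hih := ih f' nums (pos + (gjScanA w).2 + 1) (acc * 10 + (gjScanA w).1) hn1 (by omega)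
        (by omega) (by omega)
      simp only [gjRunB] at hih
      rw [hih]
      -- A side: unfold one recursion step
      conv_rhs => rw [getJoltageGo]
      rw [if_neg (show ¬((n : Int) + 1 = 1) by omega),
        show (n : Int) + 1 - 1 = (n : Int) by ring,
        PySem.List.slice_to_neg_natCast nd n (by omega), ← hw, Int.toNat_natCast,
        PySem.List.slice_from nd (show (0 : Int) ≤ (gjScanA w).2 + 1 by omega)]
      have hdd : nd.drop ((gjScanA w).2 + 1).toNat = nums.drop (pos + (gjScanA w).2 + 1).toNat := by
        rw [hnd, List.drop_drop]
        congr 1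
        omega
      rw [hdd]
      ring

-- ===== VERDICT (by name: the statement is the Claim_ definition above) =====
theorem getJoltage_spec : Claim_equal_getJoltage := by
  intro nums scale _ hpre
  obtain ⟨h1, h2⟩ := hpre
  unfold Spec_getJoltage
  obtain ⟨s, rfl⟩ : ∃ s : Nat, scale = (s : Int) := ⟨scale.toNat, by omega⟩
  have h2' : s ≤ nums.length := by exact_mod_cast h2
  have hmain := gjMain s s nums 0 0 (by exact_mod_cast h1) le_rfl le_rfl (by simpa using h2')
  rw [gjAlt_eq_run]
  simp only [Int.toNat_zero, List.drop_zero, zero_mul, zero_add] at hmain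
  rw [hmain, show getJoltage nums (s : Int) = getJoltageGo s nums (s : Int) by
    simp [getJoltage]]
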